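-- pv_equiv track=rewrite | github.com/fireceW/ChipFuzzer | getalluncoveredcode.py | filter_print_cond_blocks
-- ===== SOURCE A (Python) =====
-- def filter_print_cond_blocks(code_lines):
--     """过滤掉 if (`PRINTF_COND) begin ... $fwrite 的代码块"""
--     filtered = []
--     skip = False
--
--     for line in code_lines:
--         if 'if (`PRINTF_COND) begin' in line:
--             skip = True  # 开始跳过
--         elif skip and '$fwrite' in line:
--             skip = False  # 遇到$fwrite后停止跳过
--             continue      # 跳过当前$fwrite行
--         elif not skip:
--             filtered.append(line)
--
--     return filtered
-- ===== SOURCE B (Python) =====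
-- def filter_print_cond_blocks(code_lines):
--     """过滤掉 if (`PRINTF_COND) begin ... $fwrite 的代码块"""
--     out = []
--     i = 0
--     n = len(code_lines)
--     while i < n:
--         line = code_lines[i]
--         i += 1
--         if 'if (`PRINTF_COND) begin' in line:
--             # consume the block: drop lines until a terminating $fwrite line
--             while i < n:
--                 cur = code_lines[i]
--                 i += 1
--                 if 'if (`PRINTF_COND) begin' in cur:
--                     continue  # a new start marker keeps the block open
--                 if '$fwrite' in cur:
--                     break     # drop the $fwrite line too, block done
--         else:
--             out.append(line)
--     return out
-- ===== Notes on version B (the rewrite author's own statement) =====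
-- stated objective: alternative
-- what changed: Replaces the boolean skip-flag single pass with an explicit index loop that consumes each PRINTF_COND block in a nested inner loop ending at the terminating $fwrite line.
import Mathlib
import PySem

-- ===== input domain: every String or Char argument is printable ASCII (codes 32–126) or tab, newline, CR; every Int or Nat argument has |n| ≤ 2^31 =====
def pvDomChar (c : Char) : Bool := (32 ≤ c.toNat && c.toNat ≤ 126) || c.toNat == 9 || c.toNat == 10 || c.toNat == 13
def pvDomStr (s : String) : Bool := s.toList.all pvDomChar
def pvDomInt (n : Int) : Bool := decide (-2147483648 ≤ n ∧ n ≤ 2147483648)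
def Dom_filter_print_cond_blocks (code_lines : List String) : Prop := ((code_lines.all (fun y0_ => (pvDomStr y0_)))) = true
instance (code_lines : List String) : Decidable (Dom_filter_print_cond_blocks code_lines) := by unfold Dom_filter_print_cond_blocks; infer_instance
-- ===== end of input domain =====

-- B replaces A's boolean skip-flag single pass by a nested block-consuming loop; same cost, different decomposition.


-- ===== PORT A =====
-- A: single pass with a boolean 'skip' flag, accumulated by a fold over (filtered, skip).
def fpcStep (st : List String × Bool) (line : String) : List String × Bool :=
  if PySem.Str.isIn "if (`PRINTF_COND) begin" line then (st.1, true)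
  else if st.2 && PySem.Str.isIn "$fwrite" line then (st.1, false)
  else if !st.2 then (st.1 ++ [line], st.2)
  else st

def filter_print_cond_blocks (code_lines : List String) : List String :=
  (code_lines.foldl fpcStep ([], false)).1

-- ===== PORT B =====
-- B: outer loop copies lines; on a start marker an inner loop consumes lines up to the terminating $fwrite.
mutual
def fpcOuter : List String → List String
  | [] => []
  | line :: rest =>
    if PySem.Str.isIn "if (`PRINTF_COND) begin" line then fpcInner rest
    else line :: fpcOuter rest

def fpcInner : List String → List String
  | [] => []
  | cur :: rest =>
    if PySem.Str.isIn "if (`PRINTF_COND) begin" cur then fpcInner rest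
    else if PySem.Str.isIn "$fwrite" cur then fpcOuter rest
    else fpcInner rest
end

def filter_print_cond_blocks_alt (code_lines : List String) : List String :=
  fpcOuter code_lines

-- ===== PRECONDITION & SPEC =====
def Spec_filter_print_cond_blocks (code_lines : List String) (out : List String) : Prop := out = filter_print_cond_blocks_alt code_lines
instance (code_lines : List String) (out : List String) : Decidable (Spec_filter_print_cond_blocks code_lines out) := by unfold Spec_filter_print_cond_blocks; infer_instance

-- ===== CLAIM (what is proved, stated in full; the proofs are below) =====
def Claim_equal_filter_print_cond_blocks : Prop := ∀ (code_lines : List String), Dom_filter_print_cond_blocks code_lines → Spec_filter_print_cond_blocks code_lines (filter_print_cond_blocks code_lines)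

-- ===== LEMMAS AND PROOFS =====
theorem fpcStep_false (acc : List String) (l : String) :
    fpcStep (acc, false) l =
      if PySem.Str.isIn "if (`PRINTF_COND) begin" l = true then (acc, true)
      else (acc ++ [l], false) := by
  simp only [fpcStep]; split_ifs <;> simp_all

theorem fpcStep_true (acc : List String) (l : String) :
    fpcStep (acc, true) l =
      if PySem.Str.isIn "if (`PRINTF_COND) begin" l = true then (acc, true)
      else if PySem.Str.isIn "$fwrite" l = true then (acc, false)
      else (acc, true) := by
  simp only [fpcStep]; split_ifs <;> simp_all

-- Loop invariant: A's fold with skip=false computes acc ++ fpcOuter, with skip=true acc ++ fpcInner.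
theorem fpc_fold_inv : ∀ (xs : List String) (acc : List String),
    ((xs.foldl fpcStep (acc, false)).1 = acc ++ fpcOuter xs) ∧
    ((xs.foldl fpcStep (acc, true)).1 = acc ++ fpcInner xs) := by
  intro xs
  induction xs with
  | nil => intro acc; simp [fpcOuter, fpcInner]
  | cons l rest ih =>
    intro acc
    constructor
    · show ((l :: rest).foldl fpcStep (acc, false)).1 = acc ++ fpcOuter (l :: rest)
      rw [List.foldl_cons, fpcStep_false, fpcOuter]
      by_cases h1 : PySem.Str.isIn "if (`PRINTF_COND) begin" l = true
      · rw [if_pos h1, if_pos h1, (ih acc).2]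
      · rw [if_neg h1, if_neg h1, (ih (acc ++ [l])).1]
        simp
    · show ((l :: rest).foldl fpcStep (acc, true)).1 = acc ++ fpcInner (l :: rest)
      rw [List.foldl_cons, fpcStep_true, fpcInner]
      by_cases h1 : PySem.Str.isIn "if (`PRINTF_COND) begin" l = true
      · rw [if_pos h1, if_pos h1, (ih acc).2]
      · rw [if_neg h1, if_neg h1]
        by_cases h2 : PySem.Str.isIn "$fwrite" l = true
        · rw [if_pos h2, if_pos h2, (ih acc).1]
        · rw [if_neg h2, if_neg h2, (ih acc).2]

-- ===== VERDICT (by name: the statement is the Claim_ definition above) =====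
theorem filter_print_cond_blocks_spec : Claim_equal_filter_print_cond_blocks := by
  intro code_lines _
  unfold Spec_filter_print_cond_blocks filter_print_cond_blocks filter_print_cond_blocks_alt
  simpa using (fpc_fold_inv code_lines []).1
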